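-- pv_equiv track=rewrite | github.com/abhiaj/IITD-speech-vone | IITD-speech-vone/Theme/extractFeatures.py | get_countvector
-- ===== SOURCE A (Python) =====
-- def get_countvector(l_pos, vocb): #getting countvector from these files
--
-- 	dict_vocab = {}
--
-- 	for i,val in enumerate(vocb):
-- 		dict_vocab[val] = i
-- 	cv_pos =[]
-- 	cnt = 0
-- 	for lst in l_pos:
-- 		lst_tmp = [0]*len(vocb)
-- 		for word in lst:
-- 			try:
-- 				lst_tmp[dict_vocab[word]] = lst_tmp[dict_vocab[word]]+1
-- 			except:
-- 				x = 1
--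
-- 		cv_pos.append(lst_tmp)
--
-- 	return cv_pos
-- ===== SOURCE B (Python) =====
-- def get_countvector(l_pos, vocb):
--     # vocab-major: each row element i is simply the number of occurrences of
--     # vocb[i] in the document; no index dict, no mutation of the row.
--     return [[lst.count(v) for v in vocb] for lst in l_pos]
-- ===== Notes on version B (the rewrite author's own statement) =====
-- stated objective: simpler
-- what changed: B drops the vocab->index dict and the in-place incrementing entirely: each row is produced vocab-major as [lst.count(v) for v in vocb], a nested comprehension with no mutable state.
-- outside the precondition, e.g. on get_countvector([['a']], ['a', 'a']): A returns [[0, 1]], B returns [[1, 1]]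
import Mathlib
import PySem

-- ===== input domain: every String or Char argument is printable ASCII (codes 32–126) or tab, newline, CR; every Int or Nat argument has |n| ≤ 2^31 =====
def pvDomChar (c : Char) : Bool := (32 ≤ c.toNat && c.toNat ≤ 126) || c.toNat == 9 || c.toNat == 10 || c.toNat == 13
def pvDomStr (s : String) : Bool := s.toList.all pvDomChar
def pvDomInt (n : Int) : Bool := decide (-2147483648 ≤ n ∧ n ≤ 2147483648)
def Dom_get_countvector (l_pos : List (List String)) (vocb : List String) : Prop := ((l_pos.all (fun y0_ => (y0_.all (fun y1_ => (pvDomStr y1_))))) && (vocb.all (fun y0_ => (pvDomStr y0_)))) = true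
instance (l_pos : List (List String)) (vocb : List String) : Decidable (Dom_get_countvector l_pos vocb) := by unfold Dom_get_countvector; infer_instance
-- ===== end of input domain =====

-- B drops the vocab->index dict and all row mutation: each row is built vocab-major
-- as [lst.count(v) for v in vocb] (simpler; no speed claim).

-- ===== PORT A =====
-- the vocab->index map A builds
def pvVocabIndex (vocb : List String) : PySem.Dict String Int :=
  (PySem.List.enumerate vocb).foldl (fun d p => d.insert p.2 p.1)
    (PySem.Dict.empty : PySem.Dict String Int)

def get_countvector (l_pos : List (List String)) (vocb : List String) : List (List Int) :=
  let dict_vocab := pvVocabIndex vocb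
  l_pos.foldl (fun cv lst =>
    let lst_tmp := lst.foldl (fun tmp word =>
      -- try: lst_tmp[dict_vocab[word]] += 1  except: skipped (KeyError; index always in range)
      match dict_vocab.get? word with
      | some i => PySem.List.pySetD tmp i (PySem.List.pyGetD tmp i 0 + 1)
      | none => tmp) (List.replicate vocb.length (0 : Int))
    cv ++ [lst_tmp]) []

-- ===== PORT B =====
def get_countvector_alt (l_pos : List (List String)) (vocb : List String) : List (List Int) :=
  l_pos.map (fun lst => vocb.map (fun v => (PySem.List.count lst v : Int)))

-- ===== PRECONDITION & SPEC =====
-- Pre_ excludes vocab lists with duplicate entries: there A's dict overwrite sends all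
-- counts of a duplicated word to its LAST slot (earlier duplicate slots stay 0), an
-- accidental first-vs-last corner, while B counts the word in every duplicate slot.
def Pre_get_countvector (l_pos : List (List String)) (vocb : List String) : Prop :=
  vocb.Nodup
instance (l_pos : List (List String)) (vocb : List String) : Decidable (Pre_get_countvector l_pos vocb) := by unfold Pre_get_countvector; infer_instance
def pvWitness_get_countvector : List (List String) × List String :=
  ([["a", "b", "a"], ["c"]], ["a", "b", "c"])

def Spec_get_countvector (l_pos : List (List String)) (vocb : List String) (out : List (List Int)) : Prop := out = get_countvector_alt l_pos vocb
instance (l_pos : List (List String)) (vocb : List String) (out : List (List Int)) : Decidable (Spec_get_countvector l_pos vocb out) := by unfold Spec_get_countvector; infer_instance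

-- ===== CLAIM =====
def Claim_equal_get_countvector : Prop := ∀ (l_pos : List (List String)) (vocb : List String), Dom_get_countvector l_pos vocb → Pre_get_countvector l_pos vocb → Spec_get_countvector l_pos vocb (get_countvector l_pos vocb)

-- ===== LEMMAS AND PROOFS =====

-- the fold building a dict from (index, word) pairs looks up as "last matching pair wins"
theorem pvFoldGet (ps : List (Int × String)) :
    ∀ (d : PySem.Dict String Int) (w : String),
      ((ps.foldl (fun d p => d.insert p.2 p.1) d).get? w) =
        match ps.reverse.find? (fun p => p.2 == w) with
        | some q => some q.1
        | none => d.get? w := by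
  induction ps with
  | nil => intro d w; simp
  | cons p ps ih =>
    intro d w
    simp only [List.foldl_cons, List.reverse_cons, List.find?_append]
    rw [ih]
    cases h : ps.reverse.find? (fun p => p.2 == w) with
    | some q => simp [Option.or]
    | none =>
      rw [Option.none_or]
      by_cases hpw : p.2 = w
      · simp [List.find?, hpw]
      · have hwp : ¬ w = p.2 := fun h => hpw h.symm
        have hb : (p.2 == w) = false := by simp [hpw]
        simp [List.find?, hb, PySem.Dict.get?_insert, hwp]

-- characterisation of A's vocab map: a hit is some index whose vocab entry is the word
theorem pvVocabIndex_some (vocb : List String) (w : String) (j : Int)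
    (h : (pvVocabIndex vocb).get? w = some j) :
    ∃ m : Nat, j = (m : Int) ∧ ∃ hm : m < vocb.length, vocb[m] = w := by
  unfold pvVocabIndex at h
  rw [pvFoldGet] at h
  cases hf : (PySem.List.enumerate vocb).reverse.find? (fun p => p.2 == w) with
  | none => rw [hf] at h; simp [PySem.Dict.get?_empty] at h
  | some q =>
    rw [hf] at h
    have hj : q.1 = j := by injection h
    have hq2 : q.2 = w := by simpa using List.find?_some hf
    have hmem : q ∈ PySem.List.enumerate vocb := List.mem_reverse.mp (List.mem_of_find?_eq_some hf)
    rcases (PySem.List.mem_enumerate_iff vocb 0 q).mp hmem with ⟨m, hm, hq⟩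
    refine ⟨m, ?_, hm, ?_⟩
    · rw [← hj, hq]; simp
    · rw [← hq2, hq]

theorem pvVocabIndex_self (vocb : List String) (hnd : vocb.Nodup)
    (k : Nat) (hk : k < vocb.length) :
    (pvVocabIndex vocb).get? vocb[k] = some ((k : Nat) : Int) := by
  unfold pvVocabIndex
  rw [pvFoldGet]
  cases hf : (PySem.List.enumerate vocb).reverse.find? (fun p => p.2 == vocb[k]) with
  | none =>
    have hmem : ((0 : Int) + (k : Nat), vocb[k]) ∈ (PySem.List.enumerate vocb).reverse :=
      List.mem_reverse.mpr ((PySem.List.mem_enumerate_iff vocb 0 _).mpr ⟨k, hk, rfl⟩)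
    have := List.find?_eq_none.mp hf _ hmem
    simp at this
  | some q =>
    have hq2 : q.2 = vocb[k] := by simpa using List.find?_some hf
    have hmem : q ∈ PySem.List.enumerate vocb := List.mem_reverse.mp (List.mem_of_find?_eq_some hf)
    rcases (PySem.List.mem_enumerate_iff vocb 0 q).mp hmem with ⟨m, hm, hq⟩
    have hvm : vocb[m] = vocb[k] := by rw [← hq2, hq]
    have hmk : m = k := (hnd.getElem_inj_iff).mp hvm
    subst hmk
    rw [hq]
    simp

-- A's inner loop, elementwise: each slot counts the words mapping to its index
theorem pvRowA (d : PySem.Dict String Int) (n : Nat)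
    (hd : ∀ w j, d.get? w = some j → ∃ m : Nat, j = (m : Int) ∧ m < n) :
    ∀ (lst : List String) (r : List Int), r.length = n →
      (lst.foldl (fun tmp word =>
        match d.get? word with
        | some i => PySem.List.pySetD tmp i (PySem.List.pyGetD tmp i 0 + 1)
        | none => tmp) r).length = n ∧
      ∀ k, k < n →
      (lst.foldl (fun tmp word =>
        match d.get? word with
        | some i => PySem.List.pySetD tmp i (PySem.List.pyGetD tmp i 0 + 1)
        | none => tmp) r).getD k 0
        = r.getD k 0 + lst.countP (fun w => d.get? w == some ((k : Nat) : Int)) := by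
  intro lst
  induction lst with
  | nil => intro r hr; simp [hr]
  | cons w ws ih =>
    intro r hr
    simp only [List.foldl_cons]
    cases h : d.get? w with
    | none =>
      rcases ih r hr with ⟨hl, hk⟩
      refine ⟨by simpa [h] using hl, ?_⟩
      intro k hkn
      rw [hk k hkn, List.countP_cons]
      simp [h]
    | some i =>
      rcases hd w i h with ⟨m, rfl, hm⟩
      have hm' : m < r.length := by omega
      have hset : (PySem.List.pySetD r ((m : Nat) : Int)
          (PySem.List.pyGetD r ((m : Nat) : Int) 0 + 1)) = r.set m (r.getD m 0 + 1) := by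
        simp [PySem.List.pySetD_natCast, PySem.List.pyGetD_natCast]
      rcases ih (r.set m (r.getD m 0 + 1)) (by simp [hr]) with ⟨hl, hk⟩
      refine ⟨by simpa [h, hset] using hl, ?_⟩
      intro k hkn
      simp only [hset]
      rw [hk k hkn, List.countP_cons]
      have hkr : k < r.length := by omega
      by_cases hkm : k = m
      · subst hkm
        rw [List.getD_eq_getElem _ _ (by simpa using hkr), List.getElem_set_self,
            List.getD_eq_getElem _ _ hkr]
        simp [h]
        omega
      · rw [List.getD_eq_getElem _ _ (by simpa using hkr),
            List.getElem_set_ne (by omega), ← List.getD_eq_getElem _ 0 hkr]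
        have : (d.get? w == some ((k : Nat) : Int)) = false := by
          simp [h]; omega
        simp [this]

-- with a duplicate-free vocab, the two per-document rows agree
theorem pvRowEq (vocb : List String) (hnd : vocb.Nodup) (lst : List String) :
    lst.foldl (fun tmp word =>
      match (pvVocabIndex vocb).get? word with
      | some i => PySem.List.pySetD tmp i (PySem.List.pyGetD tmp i 0 + 1)
      | none => tmp) (List.replicate vocb.length (0 : Int))
    = vocb.map (fun v => (PySem.List.count lst v : Int)) := by
  have hd : ∀ w j, (pvVocabIndex vocb).get? w = some j →
      ∃ m : Nat, j = (m : Int) ∧ m < vocb.length := by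
    intro w j h
    rcases pvVocabIndex_some vocb w j h with ⟨m, rfl, hm, _⟩
    exact ⟨m, rfl, hm⟩
  obtain ⟨hlen, hval⟩ := pvRowA (pvVocabIndex vocb) vocb.length hd lst
    (List.replicate vocb.length (0 : Int)) (by simp)
  apply List.ext_getElem
  · simp [hlen]
  · intro k h1 h2
    have hk : k < vocb.length := by rwa [hlen] at h1
    rw [← List.getD_eq_getElem _ 0 h1, hval k hk, List.getElem_map]
    have hrep : (List.replicate vocb.length (0 : Int)).getD k 0 = 0 := by
      rw [List.getD_eq_getElem _ _ (by simpa using hk)]; simp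
    have hpred : (fun w => (pvVocabIndex vocb).get? w == some ((k : Nat) : Int))
        = (fun w => w == vocb[k]) := by
      funext w
      by_cases hw : w = vocb[k]
      · subst hw
        rw [pvVocabIndex_self vocb hnd k hk]
        simp
      · cases hg : (pvVocabIndex vocb).get? w with
        | none => simp [hw]
        | some j =>
          rcases pvVocabIndex_some vocb w j hg with ⟨m, rfl, hm, hvm⟩
          have hmk : m ≠ k := by intro e; subst e; exact hw hvm.symm
          simp [hw, hmk]
    rw [hrep, hpred, PySem.List.count_eq, List.count_eq_countP]
    simp

-- ===== VERDICT =====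
theorem get_countvector_spec : Claim_equal_get_countvector := by
  intro l_pos vocb _ hnd
  unfold Spec_get_countvector get_countvector get_countvector_alt
  rw [PySem.List.foldl_append_singleton_eq_map]
  simp only [List.nil_append]
  exact List.map_congr_left (fun lst _ => pvRowEq vocb hnd lst)
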